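-- pv_equiv track=rewrite | github.com/Vyacheslav314/game | hw №9 parser.py | read_weather
-- ===== SOURCE A (Python) =====
-- def read_weather(data):
--     my_list = []
--     temp_list = []
--     for i in range(len(data)):
--         if i % 12 == 0 and i != 0:
--             continue
--         else:
--             temp_list.append(data[i])
--             if len(temp_list) == 11:
--                 my_list.append(temp_list)
--                 temp_list = []
--     return my_list
-- ===== SOURCE B (Python) =====
-- def read_weather(data):
--     # one pass: drop entries at nonzero multiples of 12; second pass: slice into blocks of 11
--     filtered = [x for i, x in enumerate(data) if i == 0 or i % 12 != 0]
--     chunks = []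
--     i = 0
--     while i + 11 <= len(filtered):
--         chunks.append(filtered[i:i+11])
--         i += 11
--     return chunks
-- ===== Notes on version B (the rewrite author's own statement) =====
-- stated objective: simpler
-- what changed: A's single index loop that interleaves skipping every nonzero 12th index with chunk accumulation in a temp buffer is split into two plain passes: a filtering comprehension over enumerate, then a slice-off-11-at-a-time loop.
import Mathlib
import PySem

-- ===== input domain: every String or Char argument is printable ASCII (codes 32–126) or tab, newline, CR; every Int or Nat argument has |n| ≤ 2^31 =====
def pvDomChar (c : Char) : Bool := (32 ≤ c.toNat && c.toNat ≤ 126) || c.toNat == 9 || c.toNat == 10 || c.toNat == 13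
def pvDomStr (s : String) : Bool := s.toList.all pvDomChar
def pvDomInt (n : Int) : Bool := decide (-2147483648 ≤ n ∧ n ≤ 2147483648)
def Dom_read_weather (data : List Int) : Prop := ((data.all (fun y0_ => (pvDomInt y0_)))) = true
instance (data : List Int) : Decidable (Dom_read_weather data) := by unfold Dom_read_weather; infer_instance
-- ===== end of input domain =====

-- B replaces A's interleaved skip-and-accumulate index loop by two passes: filter out nonzero
-- multiples of 12, then slice the filtered list into blocks of 11 (objective: simpler decomposition).

-- ===== PORT A =====
def read_weather (data : List Int) : List (List Int) :=
  ((PySem.List.pyRange 0 (data.length : Int) 1).foldl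
    (fun (s : List (List Int) × List Int) i =>
      if PySem.Int.mod i 12 == 0 && i != 0 then s
      else
        let t := s.2 ++ [PySem.List.pyGetD data i 0]
        if t.length == 11 then (s.1 ++ [t], ([] : List Int)) else (s.1, t))
    ([], [])).1

-- ===== PORT B =====
-- the 'while i + 11 <= len(filtered)' loop of Source B (i starts at 0 and only grows, so it is a Nat)
def pvChunkIdx (filtered : List Int) (i : Nat) (chunks : List (List Int)) : List (List Int) :=
  if i + 11 ≤ filtered.length then
    pvChunkIdx filtered (i + 11)
      (chunks ++ [PySem.List.slice filtered (some (i : Int)) (some ((i : Int) + 11))])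
  else chunks
termination_by filtered.length - i

def read_weather_alt (data : List Int) : List (List Int) :=
  let filtered := (PySem.List.enumerate data).filterMap
    (fun p => if p.1 == 0 || PySem.Int.mod p.1 12 != 0 then some p.2 else none)
  pvChunkIdx filtered 0 []

-- ===== PRECONDITION & SPEC =====
def Spec_read_weather (data : List Int) (out : List (List Int)) : Prop := out = read_weather_alt data
instance (data : List Int) (out : List (List Int)) : Decidable (Spec_read_weather data out) := by unfold Spec_read_weather; infer_instance

-- ===== CLAIM (what is proved, stated in full; the proofs are below) =====
def Claim_equal_read_weather : Prop := ∀ (data : List Int), Dom_read_weather data → Spec_read_weather data (read_weather data)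

-- ===== LEMMAS AND PROOFS =====

-- slice-off-the-front reformulation of Source B's index loop (proof helper)
def pvChunk (filtered : List Int) (chunks : List (List Int)) : List (List Int) :=
  if 11 ≤ filtered.length then
    pvChunk (PySem.List.slice filtered (some 11) none) (chunks ++ [PySem.List.slice filtered none (some 11)])
  else chunks
termination_by filtered.length
decreasing_by simp [PySem.List.slice_from]; omega


lemma pvChunkIdx_eq_pvChunk (l : List Int) : ∀ (i : Nat) (acc : List (List Int)),
    pvChunkIdx l i acc = pvChunk (l.drop i) acc := by
  intro i acc
  induction i, acc using pvChunkIdx.induct l with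
  | case1 i acc h ih =>
    rw [pvChunkIdx, if_pos h, ih]
    conv_rhs => rw [pvChunk]
    rw [if_pos (by simp; omega)]
    have h1 : PySem.List.slice l (some (i : Int)) (some ((i : Int) + 11)) =
        PySem.List.slice (l.drop i) none (some 11) := by
      rw [PySem.List.slice_toNat l (by omega) (by omega), PySem.List.slice_to _ (by omega)]
      congr 1 <;> omega
    have h2 : l.drop (i + 11) = PySem.List.slice (l.drop i) (some 11) none := by
      rw [PySem.List.slice_from _ (by omega), List.drop_drop]
      congr 1
    rw [h1, h2]
  | case2 i acc h =>
    rw [pvChunkIdx, if_neg h]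
    rw [pvChunk, if_neg (by simp; omega)]

-- A's chunking step on one value
def pvStep (s : List (List Int) × List Int) (x : Int) : List (List Int) × List Int :=
  let t := s.2 ++ [x]
  if t.length == 11 then (s.1 ++ [t], ([] : List Int)) else (s.1, t)

lemma pvChunk_fold (l : List Int) : ∀ (acc : List (List Int)) (cur : List Int),
    cur.length ≤ 10 → (l.foldl pvStep (acc, cur)).1 = pvChunk (cur ++ l) acc := by
  induction l with
  | nil =>
    intro acc cur h
    simp only [List.foldl_nil, List.append_nil]
    rw [pvChunk, if_neg (by omega)]
  | cons x xs ih =>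
    intro acc cur h
    by_cases hc : cur.length = 10
    · have h1 : (x :: xs).foldl pvStep (acc, cur) = xs.foldl pvStep (acc ++ [cur ++ [x]], []) := by
        simp [List.foldl_cons, pvStep, hc]
      rw [h1, ih _ _ (by simp)]
      conv_rhs => rw [pvChunk]
      have hl : 11 ≤ (cur ++ x :: xs).length := by simp [hc]; omega
      rw [if_pos hl]
      have heq : cur ++ x :: xs = (cur ++ [x]) ++ xs := by simp
      have h11 : ((11 : Int)).toNat = (cur ++ [x]).length := by simp [hc]
      have htake : PySem.List.slice (cur ++ x :: xs) none (some 11) = cur ++ [x] := by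
        rw [heq, PySem.List.slice_to _ (by omega), h11, List.take_left]
      have hdrop : PySem.List.slice (cur ++ x :: xs) (some 11) none = xs := by
        rw [heq, PySem.List.slice_from _ (by omega), h11, List.drop_left]
      rw [htake, hdrop]
      simp
    · have h1 : (x :: xs).foldl pvStep (acc, cur) = xs.foldl pvStep (acc, cur ++ [x]) := by
        simp [List.foldl_cons, pvStep, hc]
      rw [h1, ih _ _ (by simp; omega)]
      congr 1
      simp

lemma pvEnumerate_concat (l : List Int) (x : Int) : ∀ (s : Int),
    PySem.List.enumerate (l ++ [x]) s = PySem.List.enumerate l s ++ [(s + l.length, x)] := by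
  induction l with
  | nil => intro s; simp [PySem.List.enumerate_cons, PySem.List.enumerate_nil]
  | cons y ys ih =>
    intro s
    simp only [List.cons_append, PySem.List.enumerate_cons, ih (s+1)]
    simp
    ring

-- the kept indices of A, read through data, are exactly B's filtered list
lemma pvFiltered_eq (data : List Int) :
    ((PySem.List.pyRange 0 (data.length : Int) 1).filter
        (fun i => !(PySem.Int.mod i 12 == 0 && i != 0))).map (fun i => PySem.List.pyGetD data i 0)
      = (PySem.List.enumerate data).filterMap
          (fun p => if p.1 == 0 || PySem.Int.mod p.1 12 != 0 then some p.2 else none) := by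
  induction data using List.reverseRecOn with
  | nil => simp [PySem.List.pyRange_one_eq_nil, PySem.List.enumerate_nil]
  | append_singleton d x ih =>
    have hlen : ((d ++ [x]).length : Int) = (d.length : Int) + 1 := by simp
    rw [hlen, PySem.List.pyRange_one_succ_right (by positivity), List.filter_append, List.map_append,
        pvEnumerate_concat d x 0, List.filterMap_append]
    congr 1
    · rw [← ih]
      apply List.map_congr_left
      intro i hi
      have hmem := List.mem_filter.mp hi |>.1
      have hrange := (PySem.List.mem_pyRange_one).mp hmem
      rw [PySem.List.pyGetD_eq_getElem (d ++ [x]) 0 (by omega) (by simp; omega),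
          PySem.List.pyGetD_eq_getElem d 0 (by omega) (by exact_mod_cast hrange.2)]
      rw [List.getElem_append_left (by omega)]
    · have hget : PySem.List.pyGetD (d ++ [x]) ((d.length : Int)) 0 = x := by
        rw [PySem.List.pyGetD_eq_getElem (d ++ [x]) 0 (by omega) (by simp)]
        simp
      simp only [List.filterMap_cons, List.filterMap_nil, List.filter_cons, List.filter_nil,
        zero_add]
      by_cases hk : ((d.length : Int) == 0 || PySem.Int.mod ((d.length : Int)) 12 != 0) = true
      · have hk2 : (!(PySem.Int.mod ((d.length : Int)) 12 == 0 && ((d.length : Int)) != 0)) = true := by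
          cases hb : (PySem.Int.mod ((d.length : Int)) 12 == 0) <;>
            cases hb2 : (((d.length : Int)) == 0) <;> simp_all
        rw [hk, hk2]
        simp [hget]
      · have hk2 : (!(PySem.Int.mod ((d.length : Int)) 12 == 0 && ((d.length : Int)) != 0)) = false := by
          cases hb : (PySem.Int.mod ((d.length : Int)) 12 == 0) <;>
            cases hb2 : (((d.length : Int)) == 0) <;> simp_all
        rw [Bool.not_eq_true] at hk
        rw [hk, hk2]
        simp

theorem read_weather_spec : Claim_equal_read_weather := by
  intro data _
  unfold Spec_read_weather read_weather read_weather_alt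
  have hfold1 : (PySem.List.pyRange 0 (data.length : Int) 1).foldl
      (fun (s : List (List Int) × List Int) i =>
        if PySem.Int.mod i 12 == 0 && i != 0 then s
        else
          let t := s.2 ++ [PySem.List.pyGetD data i 0]
          if t.length == 11 then (s.1 ++ [t], ([] : List Int)) else (s.1, t))
      ([], [])
      = (PySem.List.pyRange 0 (data.length : Int) 1).foldl
          (fun s i => if (!(PySem.Int.mod i 12 == 0 && i != 0)) then pvStep s (PySem.List.pyGetD data i 0) else s)
          ([], []) := by
    apply PySem.List.foldl_congr_mem
    intro s i _
    cases hb : (PySem.Int.mod i 12 == 0 && i != 0) <;> simp_all [pvStep]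
  rw [hfold1, PySem.List.foldl_if_eq_foldl_filter
        (fun i => !(PySem.Int.mod i 12 == 0 && i != 0))
        (fun s i => pvStep s (PySem.List.pyGetD data i 0)),
      ← List.foldl_map (f := fun i => PySem.List.pyGetD data i 0) (g := pvStep), pvFiltered_eq,
      pvChunk_fold _ _ _ (by simp)]
  rw [pvChunkIdx_eq_pvChunk]
  simp
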